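-- pv_equiv track=rewrite | github.com/chrzhang/abc | adventOfCode/2018/solutions.py | day8b
-- ===== SOURCE A (Python) =====
-- def day8b(lst):
--     def value(begin):
--         result = 0
--         child_count = lst[begin]
--         meta_count = lst[begin + 1]
--         i = begin + 2
--         children_values = []
--         for _ in range(child_count):
--             val = value(i)
--             i = val[0]
--             children_values.append(val[1])
--         for _ in range(meta_count):
--             if not children_values:
--                 result += lst[i]
--             elif lst[i] <= len(children_values):
--                 result += children_values[lst[i] - 1]
--             i += 1
--         return (i, result)
--     return value(0)[1]
-- ===== SOURCE B (Python) =====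
-- # B: two-phase — parse the list into an explicit tree (consuming the list), then evaluate the tree.
-- def day8b(lst):
--     def parse(xs):
--         c, m = xs[0], xs[1]
--         rest = xs[2:]
--         kids = []
--         for _ in range(c):
--             kid, rest = parse(rest)
--             kids.append(kid)
--         metas = []
--         for _ in range(m):
--             metas.append(rest[0])
--             rest = rest[1:]
--         return (kids, metas), rest
--
--     def value(node):
--         kids, metas = node
--         if not kids:
--             return sum(metas)
--         vals = [value(k) for k in kids]
--         return sum(vals[x - 1] for x in metas if x <= len(vals))
--
--     return value(parse(lst)[0])
-- ===== Notes on version B (the rewrite author's own statement) =====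
-- stated objective: alternative
-- what changed: A interleaves parsing and evaluation in one index-threading recursion over the flat list; B is two-phase: it first parses the list into an explicit tree (consuming the list, no index arithmetic), then evaluates the tree by structural recursion.
import Mathlib
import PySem

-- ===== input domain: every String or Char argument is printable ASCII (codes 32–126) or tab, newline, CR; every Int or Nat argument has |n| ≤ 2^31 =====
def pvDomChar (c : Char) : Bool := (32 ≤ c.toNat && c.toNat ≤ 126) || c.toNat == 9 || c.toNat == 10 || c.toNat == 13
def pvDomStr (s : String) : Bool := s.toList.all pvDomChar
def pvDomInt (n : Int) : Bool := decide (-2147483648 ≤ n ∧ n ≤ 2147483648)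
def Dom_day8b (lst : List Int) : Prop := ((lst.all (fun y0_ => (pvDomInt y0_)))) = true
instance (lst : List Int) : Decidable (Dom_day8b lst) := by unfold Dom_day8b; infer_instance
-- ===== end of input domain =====

-- B re-decomposes A: A parses and evaluates in one index-threading recursion; B parses the list
-- into an explicit tree and then evaluates that tree (return value only; neither mutates its input).

-- ===== PORT A =====
-- A's inner meta loop: state (i, result); none = IndexError
def day8bMeta (lst : List Int) (cv : List Int) : Nat → Int → Int → Option (Int × Int)
  | 0, i, result => some (i, result)
  | m+1, i, result =>
    match PySem.List.pyGet? lst i with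
    | none => none
    | some x =>
      if cv = [] then day8bMeta lst cv m (i+1) (result + x)
      else if x ≤ (cv.length : Int) then
        match PySem.List.pyGet? cv (x - 1) with
        | none => none
        | some v => day8bMeta lst cv m (i+1) (result + v)
      else day8bMeta lst cv m (i+1) result

mutual
-- A's recursive value(begin); fuel models Python's recursion (lst.length+1 suffices: each level consumes ≥ 2 slots)
def day8bValue (lst : List Int) (fuel : Nat) (b : Int) : Option (Int × Int) :=
  match fuel with
  | 0 => none
  | fuel'+1 =>
    match PySem.List.pyGet? lst b, PySem.List.pyGet? lst (b+1) with
    | some c, some m =>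
      match day8bKids lst fuel' c.toNat (b+2) [] with
      | none => none
      | some (i, cv) => day8bMeta lst cv m.toNat i 0
    | _, _ => none
termination_by (fuel, 0)
-- A's child loop: children_values accumulated by append
def day8bKids (lst : List Int) (fuel : Nat) (n : Nat) (i : Int) (acc : List Int) : Option (Int × List Int) :=
  match n with
  | 0 => some (i, acc)
  | n'+1 =>
    match day8bValue lst fuel i with
    | none => none
    | some (i', v) => day8bKids lst fuel n' i' (acc ++ [v])
termination_by (fuel, n+1)
end

def day8b (lst : List Int) : Int :=
  match day8bValue lst (lst.length + 1) 0 with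
  | some p => p.2
  | none => 0      -- unreachable under Pre_ (Python raises there)

-- ===== PORT B =====
mutual
inductive BTree : Type
  | node : BKids → List Int → BTree
inductive BKids : Type
  | nil : BKids
  | cons : BTree → BKids → BKids
end

-- B's metadata-reading loop: pops rest[0] m times
def metaTake : Nat → List Int → Option (List Int × List Int)
  | 0, rest => some ([], rest)
  | m+1, rest =>
    match PySem.List.pyGet? rest 0 with
    | none => none
    | some x =>
      match metaTake m (PySem.List.slice rest (some 1) none) with
      | none => none
      | some (ms, r) => some (x :: ms, r)

mutual
-- B's parse(xs): header, children, metadata; returns (tree, remaining list)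
def parseB (fuel : Nat) (xs : List Int) : Option (BTree × List Int) :=
  match fuel with
  | 0 => none
  | fuel'+1 =>
    match PySem.List.pyGet? xs 0, PySem.List.pyGet? xs 1 with
    | some c, some m =>
      match parseKids fuel' c.toNat (PySem.List.slice xs (some 2) none) with
      | none => none
      | some (kids, rest) =>
        match metaTake m.toNat rest with
        | none => none
        | some (metas, rest') => some (BTree.node kids metas, rest')
    | _, _ => none
termination_by (fuel, 0)
def parseKids (fuel : Nat) (n : Nat) (xs : List Int) : Option (BKids × List Int) :=
  match n with
  | 0 => some (BKids.nil, xs)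
  | n'+1 =>
    match parseB fuel xs with
    | none => none
    | some (k, rest) =>
      match parseKids fuel n' rest with
      | none => none
      | some (ks, rest') => some (BKids.cons k ks, rest')
termination_by (fuel, n+1)
end

-- B's guarded sum over the metadata (none = IndexError on vals[x-1])
def metaSum (vals : List Int) : List Int → Option Int
  | [] => some 0
  | x :: xs =>
    if x ≤ (vals.length : Int) then
      match PySem.List.pyGet? vals (x - 1) with
      | none => none
      | some v => (metaSum vals xs).map (fun s => v + s)
    else metaSum vals xs

mutual
-- B's value(node): leaf sums metadata, otherwise metadata indexes the children's values
def valueB : BTree → Option Int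
  | .node kids metas =>
    match kids with
    | .nil => some metas.sum
    | _ =>
      match valsB kids with
      | none => none
      | some vals => metaSum vals metas
def valsB : BKids → Option (List Int)
  | .nil => some []
  | .cons k ks =>
    match valueB k, valsB ks with
    | some v, some vs => some (v :: vs)
    | _, _ => none
end

def day8b_alt (lst : List Int) : Int :=
  match parseB (lst.length + 1) lst with
  | some (t, _) => (valueB t).getD 0
  | none => 0      -- unreachable under Pre_ (Python raises there)

-- ===== PRECONDITION & SPEC =====
-- Pre_: lst is a well-formed AoC day-8 serialization whose metadata entries never index below the
-- start of a node's children list — exactly the inputs on which Python A returns (elsewhere it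
-- raises IndexError).  The checker below validates the shape only; it computes no values.
def chkMeta (lst : List Int) (c : Nat) : Nat → Int → Option Int
  | 0, i => some i
  | m+1, i =>
    match PySem.List.pyGet? lst i with
    | none => none
    | some x =>
      if 0 < c ∧ x ≤ (c : Int) ∧ x ≤ -(c : Int) then none
      else chkMeta lst c m (i+1)

-- runs the node acceptor over n sibling blocks, threading the position
def chkRep (f : Int → Option Int) : Nat → Int → Option Int
  | 0, i => some i
  | n+1, i =>
    match f i with
    | none => none
    | some i' => chkRep f n i'

def chkV (lst : List Int) : Nat → Int → Option Int
  | 0, _ => none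
  | fuel+1, b =>
    match PySem.List.pyGet? lst b, PySem.List.pyGet? lst (b+1) with
    | some c, some m =>
      match chkRep (chkV lst fuel) c.toNat (b+2) with
      | none => none
      | some i => chkMeta lst c.toNat m.toNat i
    | _, _ => none

def Pre_day8b (lst : List Int) : Prop := (chkV lst (lst.length + 1) 0).isSome = true
instance (lst : List Int) : Decidable (Pre_day8b lst) := by unfold Pre_day8b; infer_instance

def pvWitness_day8b : List Int := [1, 1, 0, 1, 99, 1]

def Spec_day8b (lst : List Int) (out : Int) : Prop := out = day8b_alt lst
instance (lst : List Int) (out : Int) : Decidable (Spec_day8b lst out) := by unfold Spec_day8b; infer_instance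

-- ===== CLAIM (what is proved, stated in full; the proofs are below) =====
def Claim_equal_day8b : Prop := ∀ (lst : List Int), Dom_day8b lst → Pre_day8b lst → Spec_day8b lst (day8b lst)

-- ===== LEMMAS AND PROOFS =====

theorem pvGetDrop0 (lst : List Int) (i : Int) (hi : 0 ≤ i) :
    PySem.List.pyGet? (lst.drop i.toNat) 0 = PySem.List.pyGet? lst i := by
  rw [PySem.List.pyGet?_zero, PySem.List.pyGet?_of_nonneg lst hi]
  simp [List.getElem?_drop]

theorem pvGetDrop1 (lst : List Int) (b : Int) (hb : 0 ≤ b) :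
    PySem.List.pyGet? (lst.drop b.toNat) 1 = PySem.List.pyGet? lst (b+1) := by
  rw [PySem.List.pyGet?_of_nonneg _ (by omega : (0:Int) ≤ 1),
      PySem.List.pyGet?_of_nonneg lst (by omega : (0:Int) ≤ b+1), List.getElem?_drop]
  congr 1; omega

theorem pvSliceDrop1 (lst : List Int) (i : Int) (hi : 0 ≤ i) :
    PySem.List.slice (lst.drop i.toNat) (some 1) none = lst.drop (i+1).toNat := by
  rw [PySem.List.slice_from_one, List.tail_drop]
  congr 1; omega

theorem pvSliceDrop2 (lst : List Int) (b : Int) (hb : 0 ≤ b) :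
    PySem.List.slice (lst.drop b.toNat) (some 2) none = lst.drop (b+2).toNat := by
  rw [PySem.List.slice_from _ (by omega : (0:Int) ≤ 2), List.drop_drop]
  congr 1; omega

theorem valsB_nil_of_empty (kids : BKids) (h : valsB kids = some []) : kids = BKids.nil := by
  cases kids with
  | nil => rfl
  | cons k ks =>
    simp only [valsB] at h
    rcases hv : valueB k with _ | v <;> rcases hs : valsB ks with _ | vs <;>
      simp [hv, hs] at h

theorem day8b_meta0 (lst : List Int) (m : Nat) : ∀ (i e : Int), 0 ≤ i →
    chkMeta lst 0 m i = some e →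
    ∃ metas, metaTake m (lst.drop i.toNat) = some (metas, lst.drop e.toNat) ∧
      (∀ r, day8bMeta lst [] m i r = some (e, r + metas.sum)) ∧ i ≤ e := by
  induction m with
  | zero =>
    intro i e hi h
    simp only [chkMeta, Option.some.injEq] at h
    subst h
    exact ⟨[], by simp [metaTake], fun r => by simp [day8bMeta], le_rfl⟩
  | succ m ih =>
    intro i e hi h
    cases hx : PySem.List.pyGet? lst i with
    | none => simp [chkMeta, hx] at h
    | some x =>
      simp only [chkMeta, hx] at h
      rw [if_neg (by simp)] at h
      obtain ⟨metas, hmt, hdm, hle⟩ := ih (i+1) e (by omega) h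
      refine ⟨x :: metas, ?_, ?_, by omega⟩
      · simp only [metaTake, pvGetDrop0 lst i hi, hx, pvSliceDrop1 lst i hi, hmt]
      · intro r
        simp only [day8bMeta, hx, if_true]
        rw [hdm (r + x)]
        simp only [List.sum_cons, Option.some.injEq, Prod.mk.injEq, true_and]
        omega

theorem day8b_metaC (lst cv : List Int) (hcv : cv ≠ []) (m : Nat) : ∀ (i e : Int), 0 ≤ i →
    chkMeta lst cv.length m i = some e →
    ∃ metas s, metaTake m (lst.drop i.toNat) = some (metas, lst.drop e.toNat) ∧
      metaSum cv metas = some s ∧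
      (∀ r, day8bMeta lst cv m i r = some (e, r + s)) ∧ i ≤ e := by
  induction m with
  | zero =>
    intro i e hi h
    simp only [chkMeta, Option.some.injEq] at h
    subst h
    exact ⟨[], 0, by simp [metaTake], by simp [metaSum], fun r => by simp [day8bMeta], le_rfl⟩
  | succ m ih =>
    intro i e hi h
    have hcpos : 0 < cv.length := List.length_pos_iff.mpr hcv
    cases hx : PySem.List.pyGet? lst i with
    | none => simp [chkMeta, hx] at h
    | some x =>
      simp only [chkMeta, hx] at h
      by_cases hbad : 0 < cv.length ∧ x ≤ (cv.length : Int) ∧ x ≤ -(cv.length : Int)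
      · rw [if_pos hbad] at h; simp at h
      · rw [if_neg hbad] at h
        obtain ⟨metas, s, hmt, hms, hdm, hle⟩ := ih (i+1) e (by omega) h
        by_cases hx2 : x ≤ (cv.length : Int)
        · -- in-bounds metadata reference: both add cv[x-1]
          have hv : ∃ v, PySem.List.pyGet? cv (x - 1) = some v := by
            rcases hv : PySem.List.pyGet? cv (x - 1) with _ | v
            · rw [PySem.List.pyGet?_eq_none_iff] at hv
              exact absurd ⟨by omega, by omega⟩ hv
            · exact ⟨v, rfl⟩
          obtain ⟨v, hv⟩ := hv
          refine ⟨x :: metas, v + s, ?_, ?_, ?_, by omega⟩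
          · simp only [metaTake, pvGetDrop0 lst i hi, hx, pvSliceDrop1 lst i hi, hmt]
          · simp only [metaSum, if_pos hx2, hv, hms, Option.map_some]
          · intro r
            simp only [day8bMeta, hx, if_neg hcv, if_pos hx2]
            simp only [hv]
            rw [hdm (r + v)]
            simp only [Option.some.injEq, Prod.mk.injEq, true_and]
            omega
        · -- out-of-range metadata reference: both skip it
          refine ⟨x :: metas, s, ?_, ?_, ?_, by omega⟩
          · simp only [metaTake, pvGetDrop0 lst i hi, hx, pvSliceDrop1 lst i hi, hmt]
          · simp only [metaSum, if_neg hx2, hms]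
          · intro r
            simp only [day8bMeta, hx, if_neg hcv, if_neg hx2]
            exact hdm r

theorem day8b_kids (lst : List Int) (fuel : Nat)
    (hV : ∀ b e : Int, 0 ≤ b → chkV lst fuel b = some e →
      ∃ r kids metas, day8bValue lst fuel b = some (e, r) ∧
        parseB fuel (lst.drop b.toNat) = some (BTree.node kids metas, lst.drop e.toNat) ∧
        valueB (BTree.node kids metas) = some r ∧ b ≤ e) :
    ∀ (n : Nat) (i i' : Int) (acc : List Int), 0 ≤ i → chkRep (chkV lst fuel) n i = some i' →
      ∃ cv kids, day8bKids lst fuel n i acc = some (i', acc ++ cv) ∧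
        parseKids fuel n (lst.drop i.toNat) = some (kids, lst.drop i'.toNat) ∧
        valsB kids = some cv ∧ cv.length = n ∧ i ≤ i' := by
  intro n
  induction n with
  | zero =>
    intro i i' acc hi h
    simp only [chkRep, Option.some.injEq] at h
    subst h
    exact ⟨[], BKids.nil, by simp [day8bKids], by simp [parseKids], by simp [valsB], rfl, le_rfl⟩
  | succ n ih =>
    intro i i' acc hi h
    cases h1 : chkV lst fuel i with
    | none => simp [chkRep, h1] at h
    | some i1 =>
      simp only [chkRep, h1] at h
      obtain ⟨r, kids1, metas1, hA1, hB1, hv1, hle1⟩ := hV i i1 hi h1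
      obtain ⟨cv, kids, hk, hpk, hvals, hlen, hle2⟩ := ih i1 i' (acc ++ [r]) (by omega) h
      refine ⟨r :: cv, BKids.cons (BTree.node kids1 metas1) kids, ?_, ?_, ?_, by simp [hlen], by omega⟩
      · simp only [day8bKids, hA1, hk, List.append_assoc, List.singleton_append]
      · simp only [parseKids, hB1, hpk]
      · simp only [valsB, hv1, hvals]

theorem day8b_main (lst : List Int) (fuel : Nat) :
    ∀ b e : Int, 0 ≤ b → chkV lst fuel b = some e →
      ∃ r kids metas, day8bValue lst fuel b = some (e, r) ∧
        parseB fuel (lst.drop b.toNat) = some (BTree.node kids metas, lst.drop e.toNat) ∧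
        valueB (BTree.node kids metas) = some r ∧ b ≤ e := by
  induction fuel with
  | zero => intro b e _ h; simp [chkV] at h
  | succ fuel ih =>
    intro b e hb h
    cases hc : PySem.List.pyGet? lst b with
    | none => simp [chkV, hc] at h
    | some c =>
      cases hm : PySem.List.pyGet? lst (b+1) with
      | none => simp [chkV, hc, hm] at h
      | some m =>
        cases hk : chkRep (chkV lst fuel) c.toNat (b+2) with
        | none => simp [chkV, hc, hm, hk] at h
        | some i =>
          simp only [chkV, hc, hm, hk] at h
          obtain ⟨cv, kids, hdk, hpk, hvals, hlen, hle⟩ :=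
            day8b_kids lst fuel ih c.toNat (b+2) i [] (by omega) hk
          rw [← hlen] at h
          by_cases hnil : cv = []
          · subst hnil
            have hknil : kids = BKids.nil := valsB_nil_of_empty kids hvals
            subst hknil
            obtain ⟨metas, hmt, hdm, hle2⟩ := day8b_meta0 lst m.toNat i e (by omega) h
            refine ⟨metas.sum, BKids.nil, metas, ?_, ?_, ?_, by omega⟩
            · simp only [day8bValue, hc, hm, hdk, List.nil_append]
              rw [hdm 0]
              congr 2
              ring
            · simp only [parseB, pvGetDrop0 lst b hb, hc, pvGetDrop1 lst b hb, hm,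
                pvSliceDrop2 lst b hb, hpk, hmt]
            · simp [valueB]
          · obtain ⟨metas, s, hmt, hms, hdm, hle2⟩ :=
              day8b_metaC lst cv hnil m.toNat i e (by omega) h
            refine ⟨s, kids, metas, ?_, ?_, ?_, by omega⟩
            · simp only [day8bValue, hc, hm, hdk, List.nil_append]
              rw [hdm 0]
              congr 2
              ring
            · simp only [parseB, pvGetDrop0 lst b hb, hc, pvGetDrop1 lst b hb, hm,
                pvSliceDrop2 lst b hb, hpk, hmt]
            · have hknn : kids ≠ BKids.nil := by
                intro hkn; subst hkn
                simp only [valsB, Option.some.injEq] at hvals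
                exact hnil hvals.symm
              cases kids with
              | nil => exact absurd rfl hknn
              | cons k ks => simp only [valueB, hvals, hms]

-- ===== VERDICT (by name: the statement is the Claim_ definition above) =====
theorem day8b_spec : Claim_equal_day8b := by
  intro lst _ hpre
  unfold Pre_day8b at hpre
  obtain ⟨e, he⟩ := Option.isSome_iff_exists.mp hpre
  obtain ⟨r, kids, metas, hA, hB, hv, _⟩ := day8b_main lst (lst.length + 1) 0 e le_rfl he
  unfold Spec_day8b day8b day8b_alt
  simp only [Int.toNat_zero, List.drop_zero] at hB
  rw [hA, hB]
  simp [hv]
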